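-- pv_equiv track=rewrite | github.com/tommygood/TestWeb | highFive.py | findSol
-- ===== SOURCE A (Python) =====
-- def findSol(n,m,o,y,x):
--     num = [] #相加的數字
--     for i in range(m): #把有@的檢查八方
--         yn,xn = y[i],x[i]
--         number = 0 #要為質數
--         for a,b in [[0,1],[1,1],[1,0],[1,-1],[0,-1],[-1,-1],[-1,0],[-1,1]]:
--             ys = yn + a
--             xs = xn + b
--             if ys >= n : #y大於邊界
--                 ys = 0
--             if ys < 0 :  #y小於邊界
--                 ys = n-1
--             if xs >= n : #x大於邊界
--                 xs = 0
--             if xs < 0 :  #x小於邊界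
--                 xs = n - 1
--             if o[ys][xs] == '@' :
--                 number = number + 1
--         num = num + [number]  #每個#的九宮格的#數量
--     for i in num :  #是否為質數
--         div = 2
--         while div < i :
--             if i % div == 0:#可以整除,不是prime
--                 i = False
--             div = div + 1 #測下一個數字
--         i = True #2~n-1 都不能整除,所以是質數
--     for i in range(m):
--         yn,xn = y[i],x[i]
--         if num[i] :  #為質數就是可擊掌
--             for a,b in [[0,1],[1,1],[1,0],[1,-1],[0,-1],[-1,-1],[-1,0],[-1,1]]:
--                 ys = yn + a
--                 xs = xn + b
--                 if ys >= n : #y大於邊界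
--                     ys = 0
--                 if ys < 0 :  #y小於邊界
--                     ys = n-1
--                 if xs >= n : #x大於邊界
--                     xs = 0
--                 if xs < 0 :  #x小於邊界
--                     xs = n - 1
--                 if o[ys][xs] == '@' :
--                     o[ys][xs] = '#'
--     pos = 0
--     for i in range(n):  #有幾個@
--         for p in range(n):
--             if o[i][p] == '@':
--                 pos = pos + 1
--     return o,pos
-- ===== SOURCE B (Python) =====
-- def findSol(n, m, o, y, x):
--     # Single neighbor pass building a set of '@'-positions to convert; total '@' counted
--     # on the original grid, final count returned as delta (no rescan, no dead primality loop).
--     # Mutates o in place exactly as the original does.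
--     def wrap(v):
--         if v >= n:
--             return 0
--         if v < 0:
--             return n - 1
--         return v
--     offs = [(0, 1), (1, 1), (1, 0), (1, -1), (0, -1), (-1, -1), (-1, 0), (-1, 1)]
--     to_convert = set()
--     for i in range(m):
--         yi, xi = y[i], x[i]
--         for a, b in offs:
--             ys, xs = wrap(yi + a), wrap(xi + b)
--             if o[ys][xs] == '@':
--                 to_convert.add((ys, xs))
--     orig = sum(1 for r in range(n) for c in range(n) if o[r][c] == '@')
--     for ys, xs in to_convert:
--         o[ys][xs] = '#'
--     return o, orig - len(to_convert)
-- ===== Notes on version B (the rewrite author's own statement) =====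
-- stated objective: simpler
-- what changed: B fuses A's neighbor-count pass and convert pass into one pass that collects the '@'-neighbor positions into a set, drops A's dead primality loop, and replaces A's final full-grid rescan by counting '@' once on the original grid and returning orig_count - len(converted set).
-- outside the precondition, e.g. on findSol(0, 1, [['@']], [0], [0]): A returns ([['#']], 0), B returns ([['#']], -4)
import Mathlib
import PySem

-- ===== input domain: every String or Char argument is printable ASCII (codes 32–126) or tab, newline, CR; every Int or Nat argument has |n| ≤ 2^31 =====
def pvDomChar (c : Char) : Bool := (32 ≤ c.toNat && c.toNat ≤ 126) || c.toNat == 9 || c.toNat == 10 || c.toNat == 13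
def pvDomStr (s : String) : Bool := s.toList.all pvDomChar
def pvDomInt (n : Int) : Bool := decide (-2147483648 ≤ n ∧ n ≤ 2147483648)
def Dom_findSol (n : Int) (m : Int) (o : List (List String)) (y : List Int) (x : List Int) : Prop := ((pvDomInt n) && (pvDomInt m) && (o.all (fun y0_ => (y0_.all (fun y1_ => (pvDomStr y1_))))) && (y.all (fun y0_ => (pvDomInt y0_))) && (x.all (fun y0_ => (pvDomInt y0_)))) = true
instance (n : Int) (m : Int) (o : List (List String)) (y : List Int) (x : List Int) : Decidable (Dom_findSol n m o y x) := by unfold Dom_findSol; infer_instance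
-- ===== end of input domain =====

-- B fuses A's count pass and convert pass into one set-building pass, drops the dead
-- primality loop, and returns orig-'@'-count minus the number of converted cells instead
-- of rescanning the grid.  (Both Pythons mutate o in place the same way; the equivalence
-- proved here is about the return value.)

-- ===== PORT A =====
-- the 8 neighbor offsets (shared literal of both Pythons)
def pvOffs : List (Int × Int) := [(0,1),(1,1),(1,0),(1,-1),(0,-1),(-1,-1),(-1,0),(-1,1)]

-- A's four sequential boundary ifs (B's `wrap` computes the same branches)
def pvWrap (n v : Int) : Int :=
  let v1 := if v ≥ n then 0 else v
  if v1 < 0 then n - 1 else v1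

-- o[r][c]; exact where 0 ≤ r < len(o) and 0 ≤ c < len(o[r]) (guaranteed under Pre_)
def pvGet2 (g : List (List String)) (r c : Int) : String :=
  PySem.List.pyGetD (PySem.List.pyGetD g r []) c ""

-- o[r][c] = v; exact for 0 ≤ r, 0 ≤ c in range (guaranteed under Pre_)
def pvSet2 (g : List (List String)) (r c : Int) (v : String) : List (List String) :=
  g.set r.toNat ((PySem.List.pyGetD g r []).set c.toNat v)

-- A's dead primality scan: `while div < i: if i % div == 0: i = False; div += 1`
-- (`i = False` makes the guard `div < i` compare against 0, so the scan stops there)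
def pvPrimeScan (dv i : Int) : Unit :=
  if h : dv < i then
    if PySem.Int.mod i dv = 0 then pvPrimeScan (dv + 1) 0 else pvPrimeScan (dv + 1) i
  else ()
termination_by (max i 0 - dv).toNat
decreasing_by all_goals omega

def findSol (n : Int) (m : Int) (o : List (List String)) (y : List Int) (x : List Int) : List (List String) × Int :=
  let num : List Int := (PySem.List.pyRange 0 m 1).foldl (fun num i =>
      let yn := PySem.List.pyGetD y i 0
      let xn := PySem.List.pyGetD x i 0
      let number : Int := pvOffs.foldl (fun number ab =>
          let ys := pvWrap n (yn + ab.1)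
          let xs := pvWrap n (xn + ab.2)
          if pvGet2 o ys xs = "@" then number + 1 else number) 0
      num ++ [number]) []
  let _ : Unit := num.foldl (fun _ i => pvPrimeScan 2 i) ()   -- the dead primality loop
  let o2 := (PySem.List.pyRange 0 m 1).foldl (fun g i =>
      let yn := PySem.List.pyGetD y i 0
      let xn := PySem.List.pyGetD x i 0
      if PySem.List.pyGetD num i 0 ≠ 0 then
        pvOffs.foldl (fun g ab =>
          let ys := pvWrap n (yn + ab.1)
          let xs := pvWrap n (xn + ab.2)
          if pvGet2 g ys xs = "@" then pvSet2 g ys xs "#" else g) g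
      else g) o
  let pos : Int := (PySem.List.pyRange 0 n 1).foldl (fun pos i =>
      (PySem.List.pyRange 0 n 1).foldl (fun pos p =>
        if pvGet2 o2 i p = "@" then pos + 1 else pos) pos) 0
  (o2, pos)

-- ===== PORT B =====
def findSol_alt (n : Int) (m : Int) (o : List (List String)) (y : List Int) (x : List Int) : List (List String) × Int :=
  let toConv : PySem.Set (Int × Int) := (PySem.List.pyRange 0 m 1).foldl (fun s i =>
      let yi := PySem.List.pyGetD y i 0
      let xi := PySem.List.pyGetD x i 0
      pvOffs.foldl (fun s ab =>
        let ys := pvWrap n (yi + ab.1)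
        let xs := pvWrap n (xi + ab.2)
        if pvGet2 o ys xs = "@" then PySem.Set.add s (ys, xs) else s) s) PySem.Set.empty
  let orig : Int := (PySem.List.pyRange 0 n 1).foldl (fun k r =>
      (PySem.List.pyRange 0 n 1).foldl (fun k c =>
        if pvGet2 o r c = "@" then k + 1 else k) k) 0
  let g := toConv.foldl (fun g p => pvSet2 g p.1 p.2 "#") o
  (g, orig - (toConv.length : Int))

-- ===== PRECONDITION & SPEC =====
-- Pre_ excludes inputs where A raises an IndexError (grid smaller than n×n, or m beyond
-- len(y)/len(x)) and the degenerate n ≤ 0 with m > 0, where A's boundary clamp to n-1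
-- produces a negative index that Python's negative-index wraparound accidentally resolves.
def Pre_findSol (n : Int) (m : Int) (o : List (List String)) (y : List Int) (x : List Int) : Prop :=
  ((1 ≤ n ∧ n.toNat ≤ o.length ∧ ∀ i < n.toNat, n.toNat ≤ (o.map List.length).getD i 0)
    ∨ (n ≤ 0 ∧ m ≤ 0))
  ∧ m.toNat ≤ y.length ∧ m.toNat ≤ x.length
instance (n : Int) (m : Int) (o : List (List String)) (y : List Int) (x : List Int) : Decidable (Pre_findSol n m o y x) := by unfold Pre_findSol; infer_instance

def pvWitness_findSol : Int × Int × List (List String) × List Int × List Int :=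
  (2, 1, [["@", "."], [".", "."]], [0], [1])

def Spec_findSol (n : Int) (m : Int) (o : List (List String)) (y : List Int) (x : List Int) (out : List (List String) × Int) : Prop := out = findSol_alt n m o y x
instance (n : Int) (m : Int) (o : List (List String)) (y : List Int) (x : List Int) (out : List (List String) × Int) : Decidable (Spec_findSol n m o y x out) := by unfold Spec_findSol; infer_instance

-- ===== CLAIM (what is proved, stated in full; the proofs are below) =====
def Claim_equal_findSol : Prop := ∀ (n : Int) (m : Int) (o : List (List String)) (y : List Int) (x : List Int), Dom_findSol n m o y x → Pre_findSol n m o y x → Spec_findSol n m o y x (findSol n m o y x)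

-- ===== LEMMAS AND PROOFS =====

-- entry of a grid at Nat coordinates
def pvEnt (g : List (List String)) (i j : Nat) : String := ((g[i]?.getD [])[j]?).getD ""

def pvPosOk (n : Int) (p : Int × Int) : Prop := 0 ≤ p.1 ∧ p.1 < n ∧ 0 ≤ p.2 ∧ p.2 < n

def pvGridOk (n : Int) (g : List (List String)) : Prop :=
  n.toNat ≤ g.length ∧ ∀ i < n.toNat, n.toNat ≤ (g.map List.length).getD i 0

def pvMark (g : List (List String)) (l : List (Int × Int)) : List (List String) :=
  l.foldl (fun g p => pvSet2 g p.1 p.2 "#") g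

def pvNbr (n : Int) (y x : List Int) (i : Int) : List (Int × Int) :=
  pvOffs.map (fun ab => (pvWrap n (PySem.List.pyGetD y i 0 + ab.1),
                         pvWrap n (PySem.List.pyGetD x i 0 + ab.2)))

def pvAt (n : Int) (o : List (List String)) (y x : List Int) (i : Int) : List (Int × Int) :=
  (pvNbr n y x i).filter (fun p => pvGet2 o p.1 p.2 == "@")

lemma pvWrap_ok (n v : Int) (hn : 1 ≤ n) : 0 ≤ pvWrap n v ∧ pvWrap n v < n := by
  unfold pvWrap; dsimp only; split_ifs <;> omega

lemma pvGet2_eq_ent (g : List (List String)) (r c : Int) (hr : 0 ≤ r) (hc : 0 ≤ c) :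
    pvGet2 g r c = pvEnt g r.toNat c.toNat := by
  simp [pvGet2, pvEnt, PySem.List.pyGetD_of_nonneg _ _ hr, PySem.List.pyGetD_of_nonneg _ _ hc,
    List.getD_eq_getElem?_getD]

lemma grid_ext (g₁ g₂ : List (List String))
    (h1 : g₁.map List.length = g₂.map List.length)
    (h2 : ∀ i j, pvEnt g₁ i j = pvEnt g₂ i j) : g₁ = g₂ := by
  have hlen : g₁.length = g₂.length := by simpa using congrArg List.length h1
  apply List.ext_getElem hlen
  intro i hi1 hi2
  have hrow : g₁[i].length = g₂[i].length := by
    have := congrArg (fun l => l[i]?) h1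
    simpa [List.getElem?_map, List.getElem?_eq_getElem, hi1, hi2] using this
  apply List.ext_getElem hrow
  intro j hj1 hj2
  have := h2 i j
  simpa [pvEnt, List.getElem?_eq_getElem, hi1, hi2, hj1, hj2] using this

lemma pvSet2_maplen (g : List (List String)) (r c : Int) (v : String) (hr : 0 ≤ r) :
    (pvSet2 g r c v).map List.length = g.map List.length := by
  unfold pvSet2
  rw [PySem.List.pyGetD_of_nonneg _ _ hr]
  apply List.ext_getElem?
  intro i
  simp only [List.getElem?_map, List.getElem?_set]
  by_cases hi : r.toNat = i
  · subst hi
    by_cases hlt : r.toNat < g.length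
    · simp [hlt, List.getD_eq_getElem?_getD, List.getElem?_eq_getElem hlt]
    · simp [hlt, List.getElem?_eq_none (by omega : g.length ≤ r.toNat)]
  · simp [hi]
lemma ent_pvSet2 (g : List (List String)) (r c : Int) (v : String)
    (hr : 0 ≤ r) (hrl : r.toNat < g.length) (hc : 0 ≤ c) (hcl : c.toNat < (g.map List.length).getD r.toNat 0)
    (i j : Nat) :
    pvEnt (pvSet2 g r c v) i j = if (i : Int) = r ∧ (j : Int) = c then v else pvEnt g i j := by
  have hclen : c.toNat < (g[r.toNat]'hrl).length := by
    simpa [List.getD_eq_getElem?_getD, List.getElem?_map, List.getElem?_eq_getElem hrl] using hcl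
  unfold pvSet2 pvEnt
  rw [PySem.List.pyGetD_of_nonneg _ _ hr]
  have hrowD : g.getD r.toNat [] = g[r.toNat]'hrl := by
    simp [List.getD_eq_getElem?_getD, List.getElem?_eq_getElem hrl]
  by_cases hi : (i : Int) = r
  · have hi' : i = r.toNat := by omega
    subst hi'
    rw [List.getElem?_set]
    simp only [if_pos rfl, hrl, if_pos]
    by_cases hj : (j : Int) = c
    · have hj' : j = c.toNat := by omega
      subst hj'
      simp [hrowD, List.getElem?_set, hclen, hi, hj, List.getElem?_eq_getElem hrl]
    · have hj' : j ≠ c.toNat := by omega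
      simp [hrowD, List.getElem?_set, Ne.symm hj', hj, List.getElem?_eq_getElem hrl]
  · have hi' : i ≠ r.toNat := by omega
    rw [List.getElem?_set]
    simp [Ne.symm hi', hi]

lemma gridOk_of_maplen (n : Int) (g₁ g₂ : List (List String))
    (h : g₁.map List.length = g₂.map List.length) (hg : pvGridOk n g₂) : pvGridOk n g₁ := by
  have hlen : g₁.length = g₂.length := by simpa using congrArg List.length h
  exact ⟨by rw [hlen]; exact hg.1, by rw [h]; exact hg.2⟩

lemma mark_maplen (l : List (Int × Int)) (n : Int) (g : List (List String))
    (hl : ∀ p ∈ l, pvPosOk n p) (hg : pvGridOk n g) :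
    (pvMark g l).map List.length = g.map List.length := by
  induction l generalizing g with
  | nil => rfl
  | cons p t ih =>
    have hp := hl p (List.mem_cons_self ..)
    have hset := pvSet2_maplen g p.1 p.2 "#" hp.1
    have : pvMark g (p :: t) = pvMark (pvSet2 g p.1 p.2 "#") t := rfl
    rw [this, ih (g := pvSet2 g p.1 p.2 "#") (fun q hq => hl q (List.mem_cons_of_mem _ hq)) (gridOk_of_maplen n _ g hset hg), hset]

lemma ent_mark (l : List (Int × Int)) (n : Int) (g : List (List String))
    (hl : ∀ p ∈ l, pvPosOk n p) (hg : pvGridOk n g) (i j : Nat) :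
    pvEnt (pvMark g l) i j = if ((i : Int), (j : Int)) ∈ l then "#" else pvEnt g i j := by
  induction l generalizing g with
  | nil => simp [pvMark]
  | cons p t ih =>
    have hp := hl p (List.mem_cons_self ..)
    obtain ⟨hp1, hp2, hp3, hp4⟩ := hp
    have hrl : p.1.toNat < g.length := by
      have := hg.1; omega
    have hcl : p.2.toNat < (g.map List.length).getD p.1.toNat 0 := by
      have := hg.2 p.1.toNat (by omega); omega
    have hstep : pvMark g (p :: t) = pvMark (pvSet2 g p.1 p.2 "#") t := rfl
    rw [hstep, ih (g := pvSet2 g p.1 p.2 "#") (fun q hq => hl q (List.mem_cons_of_mem _ hq))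
        (gridOk_of_maplen n _ g (pvSet2_maplen g p.1 p.2 "#" hp1) hg),
      ent_pvSet2 g p.1 p.2 "#" hp1 hrl hp3 hcl i j]
    by_cases ht : ((i : Int), (j : Int)) ∈ t
    · simp [ht]
    · by_cases hpm : ((i : Int), (j : Int)) = p
      · have : (i : Int) = p.1 ∧ (j : Int) = p.2 := by
          constructor <;> simp [← hpm]
        simp [ht, hpm, this]
      · have : ¬((i : Int) = p.1 ∧ (j : Int) = p.2) := by
          intro ⟨h1, h2⟩; exact hpm (Prod.ext_iff.mpr ⟨h1, h2⟩)
        simp [ht, hpm, this]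

lemma mark_ext_mem (l₁ l₂ : List (Int × Int)) (n : Int) (g : List (List String))
    (h₁ : ∀ p ∈ l₁, pvPosOk n p) (h₂ : ∀ p ∈ l₂, pvPosOk n p) (hg : pvGridOk n g)
    (hmem : ∀ p, p ∈ l₁ ↔ p ∈ l₂) : pvMark g l₁ = pvMark g l₂ := by
  apply grid_ext
  · rw [mark_maplen l₁ n g h₁ hg, mark_maplen l₂ n g h₂ hg]
  · intro i j
    simp only [ent_mark l₁ n g h₁ hg, ent_mark l₂ n g h₂ hg, hmem]

lemma pvGet2_mark (l : List (Int × Int)) (n : Int) (g : List (List String)) (p : Int × Int)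
    (hl : ∀ q ∈ l, pvPosOk n q) (hg : pvGridOk n g) (hp : pvPosOk n p) :
    pvGet2 (pvMark g l) p.1 p.2 = if p ∈ l then "#" else pvGet2 g p.1 p.2 := by
  obtain ⟨h1, h2, h3, h4⟩ := hp
  rw [pvGet2_eq_ent _ _ _ h1 h3, pvGet2_eq_ent _ _ _ h1 h3,
    ent_mark l n g hl hg]
  have hcast : ((p.1.toNat : Int), (p.2.toNat : Int)) = p := by
    ext <;> simp <;> omega
  rw [hcast]

-- neighbor positions are always inside the n×n grid
lemma pvNbr_posOk (n : Int) (y x : List Int) (i : Int) (hn : 1 ≤ n) :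
    ∀ p ∈ pvNbr n y x i, pvPosOk n p := by
  intro p hp
  simp only [pvNbr, List.mem_map] at hp
  obtain ⟨ab, -, rfl⟩ := hp
  exact ⟨(pvWrap_ok n _ hn).1, (pvWrap_ok n _ hn).2, (pvWrap_ok n _ hn).1, (pvWrap_ok n _ hn).2⟩

lemma pvAt_posOk (n : Int) (o : List (List String)) (y x : List Int) (i : Int) (hn : 1 ≤ n) :
    ∀ p ∈ pvAt n o y x i, pvPosOk n p := by
  intro p hp
  exact pvNbr_posOk n y x i hn p (List.mem_of_mem_filter hp)

lemma pvAt_at (n : Int) (o : List (List String)) (y x : List Int) (i : Int) :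
    ∀ p ∈ pvAt n o y x i, pvGet2 o p.1 p.2 = "@" := by
  intro p hp
  have := List.of_mem_filter hp
  simpa using this

-- A's per-cell neighbor count is the length of the cell's '@'-neighbor list
lemma pvF_eq (n : Int) (o : List (List String)) (y x : List Int) (i : Int) :
    (pvOffs.foldl (fun number ab =>
        if pvGet2 o (pvWrap n (PySem.List.pyGetD y i 0 + ab.1)) (pvWrap n (PySem.List.pyGetD x i 0 + ab.2)) = "@"
        then number + 1 else number) (0 : Int))
      = ((pvAt n o y x i).length : Int) := by
  have h := PySem.List.foldl_ite_add_one
      (fun ab : Int × Int => pvGet2 o (pvWrap n (PySem.List.pyGetD y i 0 + ab.1)) (pvWrap n (PySem.List.pyGetD x i 0 + ab.2)) = "@")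
      pvOffs (0 : Int)
  rw [h]
  simp only [pvAt, pvNbr, ← List.countP_eq_length_filter, List.countP_map, zero_add]
  refine congrArg _ (List.countP_congr ?_)
  intro ab _
  simp [Function.comp]

-- A's conversion inner loop, starting from a marked grid, extends the mark list
lemma innerA (n : Int) (o : List (List String)) (hn : 1 ≤ n) (hg : pvGridOk n o)
    (yn xn : Int) (L : List (Int × Int)) :
    ∀ (T : List (Int × Int)), (∀ p ∈ T, pvPosOk n p) →
    L.foldl (fun g ab =>
        if pvGet2 g (pvWrap n (yn + ab.1)) (pvWrap n (xn + ab.2)) = "@"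
        then pvSet2 g (pvWrap n (yn + ab.1)) (pvWrap n (xn + ab.2)) "#" else g) (pvMark o T)
      = pvMark o (T ++ (L.map (fun ab => (pvWrap n (yn + ab.1), pvWrap n (xn + ab.2)))).filter
          (fun p => pvGet2 o p.1 p.2 == "@")) := by
  induction L with
  | nil => intro T _; simp
  | cons ab L ih =>
    intro T hT
    have hp : pvPosOk n (pvWrap n (yn + ab.1), pvWrap n (xn + ab.2)) :=
      ⟨(pvWrap_ok n _ hn).1, (pvWrap_ok n _ hn).2, (pvWrap_ok n _ hn).1, (pvWrap_ok n _ hn).2⟩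
    have hchar := pvGet2_mark T n o (pvWrap n (yn + ab.1), pvWrap n (xn + ab.2)) hT hg hp
    have hF : ∀ q ∈ ((L.map (fun ab => (pvWrap n (yn + ab.1), pvWrap n (xn + ab.2)))).filter
        (fun p => pvGet2 o p.1 p.2 == "@")), pvPosOk n q := by
      intro q hq
      have hq' := List.mem_of_mem_filter hq
      simp only [List.mem_map] at hq'
      obtain ⟨cd, -, rfl⟩ := hq'
      exact ⟨(pvWrap_ok n _ hn).1, (pvWrap_ok n _ hn).2, (pvWrap_ok n _ hn).1, (pvWrap_ok n _ hn).2⟩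
    rw [List.foldl_cons]
    by_cases hmem : (pvWrap n (yn + ab.1), pvWrap n (xn + ab.2)) ∈ T
    · have hcond : pvGet2 (pvMark o T) (pvWrap n (yn + ab.1)) (pvWrap n (xn + ab.2)) = "#" := by
        rw [hchar]; simp [hmem]
      rw [if_neg (by simp [hcond])]
      rw [ih T hT]
      by_cases hat : pvGet2 o (pvWrap n (yn + ab.1)) (pvWrap n (xn + ab.2)) = "@"
      · rw [List.map_cons, List.filter_cons, if_pos (by simpa using hat)]
        have hT1 : ∀ q ∈ T ++ (L.map (fun ab => (pvWrap n (yn + ab.1), pvWrap n (xn + ab.2)))).filter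
            (fun p => pvGet2 o p.1 p.2 == "@"), pvPosOk n q := by
          intro q hq
          rw [List.mem_append] at hq
          exact hq.elim (hT q) (hF q)
        have hT2 : ∀ q ∈ T ++ (pvWrap n (yn + ab.1), pvWrap n (xn + ab.2)) ::
            (L.map (fun ab => (pvWrap n (yn + ab.1), pvWrap n (xn + ab.2)))).filter
            (fun p => pvGet2 o p.1 p.2 == "@"), pvPosOk n q := by
          intro q hq
          simp only [List.mem_append, List.mem_cons] at hq
          rcases hq with h | h | h
          · exact hT q h
          · subst h; exact hp
          · exact hF q h
        apply mark_ext_mem _ _ n o hT1 hT2 hg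
        intro q
        simp only [List.mem_append, List.mem_cons]
        constructor
        · tauto
        · rintro (h | rfl | h)
          · tauto
          · tauto
          · tauto
      · rw [List.map_cons, List.filter_cons, if_neg (by simpa using hat)]
    · by_cases hat : pvGet2 o (pvWrap n (yn + ab.1)) (pvWrap n (xn + ab.2)) = "@"
      · have hcond : pvGet2 (pvMark o T) (pvWrap n (yn + ab.1)) (pvWrap n (xn + ab.2)) = "@" := by
          rw [hchar]; simp [hmem, hat]
        rw [if_pos hcond]
        have hstep : pvSet2 (pvMark o T) (pvWrap n (yn + ab.1)) (pvWrap n (xn + ab.2)) "#"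
            = pvMark o (T ++ [(pvWrap n (yn + ab.1), pvWrap n (xn + ab.2))]) := by
          simp [pvMark, List.foldl_append]
        have hT' : ∀ q ∈ T ++ [(pvWrap n (yn + ab.1), pvWrap n (xn + ab.2))], pvPosOk n q := by
          intro q hq
          rw [List.mem_append] at hq
          rcases hq with h | h
          · exact hT q h
          · simp only [List.mem_singleton] at h; subst h; exact hp
        rw [hstep, ih (T ++ [(pvWrap n (yn + ab.1), pvWrap n (xn + ab.2))]) hT',
          List.map_cons, List.filter_cons, if_pos (by simpa using hat), List.append_assoc,
          List.singleton_append]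
      · have hcond : pvGet2 (pvMark o T) (pvWrap n (yn + ab.1)) (pvWrap n (xn + ab.2)) ≠ "@" := by
          rw [hchar]; simp [hmem, hat]
        rw [if_neg hcond, ih T hT, List.map_cons, List.filter_cons, if_neg (by simpa using hat)]

-- A's conversion outer loop marks the union of the '@'-neighbor lists
lemma outerA (n : Int) (o : List (List String)) (y x : List Int) (num : List Int)
    (hn : 1 ≤ n) (hg : pvGridOk n o) (I : List Int)
    (hNum : ∀ i ∈ I, PySem.List.pyGetD num i 0 = 0 → pvAt n o y x i = []) :
    ∀ (T : List (Int × Int)), (∀ p ∈ T, pvPosOk n p) →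
    I.foldl (fun g i =>
        if PySem.List.pyGetD num i 0 ≠ 0 then
          pvOffs.foldl (fun g ab =>
            if pvGet2 g (pvWrap n (PySem.List.pyGetD y i 0 + ab.1)) (pvWrap n (PySem.List.pyGetD x i 0 + ab.2)) = "@"
            then pvSet2 g (pvWrap n (PySem.List.pyGetD y i 0 + ab.1)) (pvWrap n (PySem.List.pyGetD x i 0 + ab.2)) "#" else g) g
        else g) (pvMark o T)
      = pvMark o (T ++ I.flatMap (pvAt n o y x)) := by
  induction I with
  | nil => intro T _; simp
  | cons i I ih =>
    intro T hT
    have hT' : ∀ p ∈ T ++ pvAt n o y x i, pvPosOk n p := by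
      intro q hq; rw [List.mem_append] at hq
      exact hq.elim (hT q) (pvAt_posOk n o y x i hn q)
    rw [List.foldl_cons]
    by_cases h0 : PySem.List.pyGetD num i 0 ≠ 0
    · rw [if_pos h0,
        innerA n o hn hg (PySem.List.pyGetD y i 0) (PySem.List.pyGetD x i 0) pvOffs T hT]
      have : ((pvOffs.map (fun ab => (pvWrap n (PySem.List.pyGetD y i 0 + ab.1), pvWrap n (PySem.List.pyGetD x i 0 + ab.2)))).filter
          (fun p => pvGet2 o p.1 p.2 == "@")) = pvAt n o y x i := rfl
      rw [this, ih (fun j hj hz => hNum j (List.mem_cons_of_mem _ hj) hz) (T ++ pvAt n o y x i) hT',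
        List.flatMap_cons, List.append_assoc]
    · rw [if_neg h0]
      have hz : PySem.List.pyGetD num i 0 = 0 := by omega
      rw [ih (fun j hj hz => hNum j (List.mem_cons_of_mem _ hj) hz) T hT, List.flatMap_cons,
        hNum i (List.mem_cons_self ..) hz, List.nil_append]

-- B's set-building loop collects exactly the union of the '@'-neighbor lists
lemma bSet (n : Int) (o : List (List String)) (y x : List Int) (I : List Int) :
    ∀ (s : PySem.Set (Int × Int)), s.Nodup →
    (I.foldl (fun s i =>
        pvOffs.foldl (fun s ab =>
          if pvGet2 o (pvWrap n (PySem.List.pyGetD y i 0 + ab.1)) (pvWrap n (PySem.List.pyGetD x i 0 + ab.2)) = "@"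
          then PySem.Set.add s (pvWrap n (PySem.List.pyGetD y i 0 + ab.1), pvWrap n (PySem.List.pyGetD x i 0 + ab.2))
          else s) s) s).Nodup
    ∧ ∀ q, (q ∈ I.foldl (fun s i =>
        pvOffs.foldl (fun s ab =>
          if pvGet2 o (pvWrap n (PySem.List.pyGetD y i 0 + ab.1)) (pvWrap n (PySem.List.pyGetD x i 0 + ab.2)) = "@"
          then PySem.Set.add s (pvWrap n (PySem.List.pyGetD y i 0 + ab.1), pvWrap n (PySem.List.pyGetD x i 0 + ab.2))
          else s) s) s
        ↔ q ∈ s ∨ ∃ i ∈ I, q ∈ pvAt n o y x i) := by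
  have hinner : ∀ (s : PySem.Set (Int × Int)) (i : Int),
      pvOffs.foldl (fun s ab =>
        if pvGet2 o (pvWrap n (PySem.List.pyGetD y i 0 + ab.1)) (pvWrap n (PySem.List.pyGetD x i 0 + ab.2)) = "@"
        then PySem.Set.add s (pvWrap n (PySem.List.pyGetD y i 0 + ab.1), pvWrap n (PySem.List.pyGetD x i 0 + ab.2))
        else s) s
      = PySem.Set.update s ((pvOffs.filter (fun ab =>
          decide (pvGet2 o (pvWrap n (PySem.List.pyGetD y i 0 + ab.1)) (pvWrap n (PySem.List.pyGetD x i 0 + ab.2)) = "@"))).map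
            (fun ab => (pvWrap n (PySem.List.pyGetD y i 0 + ab.1), pvWrap n (PySem.List.pyGetD x i 0 + ab.2)))) := by
    intro s i
    have h1 := PySem.List.foldl_ite_eq_foldl_filter
      (fun ab : Int × Int => pvGet2 o (pvWrap n (PySem.List.pyGetD y i 0 + ab.1)) (pvWrap n (PySem.List.pyGetD x i 0 + ab.2)) = "@")
      (fun (s : PySem.Set (Int × Int)) ab => PySem.Set.add s (pvWrap n (PySem.List.pyGetD y i 0 + ab.1), pvWrap n (PySem.List.pyGetD x i 0 + ab.2)))
      pvOffs s
    rw [h1, PySem.Set.update_map_eq_foldl_add]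
  have hMmem : ∀ (i : Int) (q : Int × Int),
      (q ∈ (pvOffs.filter (fun ab =>
          decide (pvGet2 o (pvWrap n (PySem.List.pyGetD y i 0 + ab.1)) (pvWrap n (PySem.List.pyGetD x i 0 + ab.2)) = "@"))).map
            (fun ab => (pvWrap n (PySem.List.pyGetD y i 0 + ab.1), pvWrap n (PySem.List.pyGetD x i 0 + ab.2)))
        ↔ q ∈ pvAt n o y x i) := by
    intro i q
    simp only [pvAt, pvNbr, List.mem_map, List.mem_filter, decide_eq_true_eq, beq_iff_eq]
    constructor
    · rintro ⟨ab, ⟨hab, hc⟩, rfl⟩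
      exact ⟨⟨ab, hab, rfl⟩, hc⟩
    · rintro ⟨⟨ab, hab, rfl⟩, hq⟩
      exact ⟨ab, ⟨hab, hq⟩, rfl⟩
  induction I with
  | nil => intro s hs; exact ⟨hs, by simp⟩
  | cons i I ih =>
    intro s hs
    rw [List.foldl_cons, hinner s i]
    have hnd : (PySem.Set.update s ((pvOffs.filter (fun ab =>
        decide (pvGet2 o (pvWrap n (PySem.List.pyGetD y i 0 + ab.1)) (pvWrap n (PySem.List.pyGetD x i 0 + ab.2)) = "@"))).map
          (fun ab => (pvWrap n (PySem.List.pyGetD y i 0 + ab.1), pvWrap n (PySem.List.pyGetD x i 0 + ab.2))))).Nodup :=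
      PySem.Set.nodup_update s _ hs
    obtain ⟨h1, h2⟩ := ih _ hnd
    refine ⟨h1, fun q => ?_⟩
    rw [h2 q, PySem.Set.mem_update, hMmem i q]
    simp only [List.mem_cons]
    constructor
    · rintro ((h | h) | ⟨j, hj, hq⟩)
      · exact Or.inl h
      · exact Or.inr ⟨i, Or.inl rfl, h⟩
      · exact Or.inr ⟨j, Or.inr hj, hq⟩
    · rintro (h | ⟨j, hj, hq⟩)
      · exact Or.inl (Or.inl h)
      · rcases hj with rfl | hj
        · exact Or.inl (Or.inr hq)
        · exact Or.inr ⟨j, hj, hq⟩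

-- the double '@'-counting loop as a sum of per-row counts
lemma cnt_eq_sum (n : Int) (G : List (List String)) :
    ((PySem.List.pyRange 0 n 1).foldl (fun pos r =>
        (PySem.List.pyRange 0 n 1).foldl (fun pos c =>
          if pvGet2 G r c = "@" then pos + 1 else pos) pos) (0 : Int))
      = ((PySem.List.pyRange 0 n 1).map (fun r =>
          ((PySem.List.pyRange 0 n 1).countP (fun c => decide (pvGet2 G r c = "@")) : Int))).sum := by
  have h1 : ∀ (r pos : Int), (PySem.List.pyRange 0 n 1).foldl (fun pos c => if pvGet2 G r c = "@" then pos + 1 else pos) pos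
      = pos + ((PySem.List.pyRange 0 n 1).countP (fun c => decide (pvGet2 G r c = "@")) : Int) :=
    fun r pos => PySem.List.foldl_ite_add_one _ _ _
  simp only [h1]
  rw [PySem.List.foldl_add]
  simp

lemma countP_pert {α : Type} (l : List α) (a : α) (p q : α → Bool)
    (hnd : l.Nodup) (ha : a ∈ l)
    (hne : ∀ b ∈ l, b ≠ a → p b = q b) (hpa : p a = true) (hqa : q a = false) :
    (l.countP q : Int) = (l.countP p : Int) - 1 := by
  induction l with
  | nil => simp at ha
  | cons b t ih =>
    rw [List.nodup_cons] at hnd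
    rcases List.mem_cons.mp ha with rfl | hat
    · have ht : t.countP p = t.countP q :=
        List.countP_congr (fun c hc => by
          simp [hne c (List.mem_cons_of_mem _ hc) (fun h => hnd.1 (h ▸ hc))])
      rw [List.countP_cons, List.countP_cons, hpa, hqa, ht]
      simp
    · have hba : b ≠ a := fun h => hnd.1 (h ▸ hat)
      have hb := hne b (List.mem_cons_self ..) hba
      have hih := ih hnd.2 hat (fun c hc hca => hne c (List.mem_cons_of_mem _ hc) hca)
      rw [List.countP_cons, List.countP_cons, hb]
      push_cast at hih ⊢
      omega

lemma sum_map_pert (l : List Int) (a : Int) (f g : Int → Int)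
    (hnd : l.Nodup) (ha : a ∈ l)
    (hne : ∀ b ∈ l, b ≠ a → f b = g b) (hfa : f a = g a - 1) :
    (l.map f).sum = (l.map g).sum - 1 := by
  induction l with
  | nil => simp at ha
  | cons b t ih =>
    rw [List.nodup_cons] at hnd
    rcases List.mem_cons.mp ha with rfl | hat
    · have ht : t.map f = t.map g := by
        apply List.map_congr_left
        intro c hc
        exact hne c (List.mem_cons_of_mem _ hc) (fun h => hnd.1 (h ▸ hc))
      simp only [List.map_cons, List.sum_cons, ht, hfa]
      ring
    · have hba : b ≠ a := fun h => hnd.1 (h ▸ hat)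
      have hb := hne b (List.mem_cons_self ..) hba
      have := ih hnd.2 hat (fun c hc hca => hne c (List.mem_cons_of_mem _ hc) hca)
      simp only [List.map_cons, List.sum_cons, hb, this]
      ring

lemma pyRange_nodup (n : Int) : (PySem.List.pyRange 0 n 1).Nodup := by
  simp only [PySem.List.pyRange]
  exact List.Nodup.map (fun a b hab => by omega) List.nodup_range

lemma pvGet2_set (n : Int) (G : List (List String)) (hg : pvGridOk n G)
    (a b : Int) (hab : pvPosOk n (a, b)) (v : String) (r c : Int) (hrc : pvPosOk n (r, c)) :
    pvGet2 (pvSet2 G a b v) r c = if r = a ∧ c = b then v else pvGet2 G r c := by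
  obtain ⟨ha1, ha2, hb1, hb2⟩ := hab
  obtain ⟨hr1, hr2, hc1, hc2⟩ := hrc
  have hrl : a.toNat < G.length := by have := hg.1; omega
  have hcl : b.toNat < (G.map List.length).getD a.toNat 0 := by
    have := hg.2 a.toNat (by omega); omega
  rw [pvGet2_eq_ent _ _ _ hr1 hc1, pvGet2_eq_ent _ _ _ hr1 hc1,
    ent_pvSet2 G a b v ha1 hrl hb1 hcl r.toNat c.toNat]
  by_cases h : r = a ∧ c = b
  · rw [if_pos (by omega), if_pos h]
  · rw [if_neg (by omega), if_neg h]

-- setting one in-range '@' cell to '#' lowers the grid's '@' count by one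
lemma cnt_set (n : Int) (G : List (List String)) (hn : 1 ≤ n) (hg : pvGridOk n G)
    (p : Int × Int) (hp : pvPosOk n p) (hat : pvGet2 G p.1 p.2 = "@") :
    ((PySem.List.pyRange 0 n 1).map (fun r =>
        ((PySem.List.pyRange 0 n 1).countP (fun c => decide (pvGet2 (pvSet2 G p.1 p.2 "#") r c = "@")) : Int))).sum
      = ((PySem.List.pyRange 0 n 1).map (fun r =>
          ((PySem.List.pyRange 0 n 1).countP (fun c => decide (pvGet2 G r c = "@")) : Int))).sum - 1 := by
  obtain ⟨hp1, hp2, hp3, hp4⟩ := hp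
  apply sum_map_pert _ p.1 _ _ (pyRange_nodup n) (PySem.List.mem_pyRange_one.mpr ⟨hp1, hp2⟩)
  · intro r hr hra
    congr 1
    apply List.countP_congr
    intro c hc
    have hcm := PySem.List.mem_pyRange_one.mp hc
    rw [pvGet2_set n G hg p.1 p.2 ⟨hp1, hp2, hp3, hp4⟩ "#" r c ⟨(PySem.List.mem_pyRange_one.mp hr).1, (PySem.List.mem_pyRange_one.mp hr).2, hcm.1, hcm.2⟩]
    simp [hra]
  · apply countP_pert _ p.2 _ _ (pyRange_nodup n) (PySem.List.mem_pyRange_one.mpr ⟨hp3, hp4⟩)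
    · intro c hc hcb
      have hcm := PySem.List.mem_pyRange_one.mp hc
      rw [pvGet2_set n G hg p.1 p.2 ⟨hp1, hp2, hp3, hp4⟩ "#" p.1 c ⟨hp1, hp2, hcm.1, hcm.2⟩]
      simp [hcb]
    · simpa using hat
    · rw [pvGet2_set n G hg p.1 p.2 ⟨hp1, hp2, hp3, hp4⟩ "#" p.1 p.2 ⟨hp1, hp2, hp3, hp4⟩]
      simp

-- marking a distinct list of '@' cells lowers the count by its length
lemma cnt_mark (n : Int) (o : List (List String)) (hn : 1 ≤ n) (hg : pvGridOk n o)
    (S : List (Int × Int)) (hS : S.Nodup) (hpos : ∀ p ∈ S, pvPosOk n p)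
    (hat : ∀ p ∈ S, pvGet2 o p.1 p.2 = "@") :
    ((PySem.List.pyRange 0 n 1).map (fun r =>
        ((PySem.List.pyRange 0 n 1).countP (fun c => decide (pvGet2 (pvMark o S) r c = "@")) : Int))).sum
      = ((PySem.List.pyRange 0 n 1).map (fun r =>
          ((PySem.List.pyRange 0 n 1).countP (fun c => decide (pvGet2 o r c = "@")) : Int))).sum - S.length := by
  induction S using List.reverseRecOn with
  | nil =>
    simp only [pvMark, List.foldl_nil, List.length_nil, Nat.cast_zero, sub_zero]
    rfl
  | append_singleton S p ih =>
    obtain ⟨hSn, -, hdisj⟩ := List.nodup_append.mp hS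
    have hpS : p ∉ S := fun hm => (hdisj p hm p (List.mem_singleton_self p)) rfl
    have hposS : ∀ q ∈ S, pvPosOk n q := fun q hq => hpos q (List.mem_append_left _ hq)
    have hatS : ∀ q ∈ S, pvGet2 o q.1 q.2 = "@" := fun q hq => hat q (List.mem_append_left _ hq)
    have hpP : pvPosOk n p := hpos p (List.mem_append_right _ (List.mem_singleton_self p))
    have hgm : pvGridOk n (pvMark o S) := gridOk_of_maplen n _ o (mark_maplen S n o hposS hg) hg
    have hmark : pvMark o (S ++ [p]) = pvSet2 (pvMark o S) p.1 p.2 "#" := by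
      simp [pvMark, List.foldl_append]
    have hatm : pvGet2 (pvMark o S) p.1 p.2 = "@" := by
      rw [pvGet2_mark S n o p hposS hg hpP, if_neg hpS]
      exact hat p (List.mem_append_right _ (List.mem_singleton_self p))
    rw [hmark, cnt_set n (pvMark o S) hn hgm p hpP hatm, ih hSn hposS hatS]
    simp only [List.length_append, List.length_singleton]
    push_cast
    ring

-- num lookups inside range hit the mapped value
lemma lookup_map_pyRange (f : Int → Int) (m i : Int) (hi : i ∈ PySem.List.pyRange 0 m 1) :
    PySem.List.pyGetD ((PySem.List.pyRange 0 m 1).map f) i 0 = f i := by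
  obtain ⟨h0, h1⟩ := PySem.List.mem_pyRange_one.mp hi
  rw [show m = ((m.toNat : Nat) : Int) by omega, show i = ((i.toNat : Nat) : Int) by omega]
  exact PySem.List.pyGetD_map_pyRange f m.toNat i.toNat 0 (by omega)

-- ===== VERDICT (by name: the statement is the Claim_ definition above) =====
set_option maxHeartbeats 1000000 in
theorem findSol_spec : Claim_equal_findSol := by
  intro n m o y x hdom hpre
  unfold Spec_findSol
  obtain ⟨hshape, hy, hx⟩ := hpre
  rcases hshape with ⟨hn, hlen, hrows⟩ | ⟨hn0, hm0⟩
  · have hg : pvGridOk n o := ⟨hlen, hrows⟩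
    simp only [findSol, findSol_alt]
    simp only [PySem.List.foldl_append_singleton_eq_map, List.nil_append, pvF_eq]
    have hNum : ∀ i ∈ PySem.List.pyRange 0 m 1,
        PySem.List.pyGetD ((PySem.List.pyRange 0 m 1).map (fun i => ((pvAt n o y x i).length : Int))) i 0 = 0 →
        pvAt n o y x i = [] := by
      intro i hi h0
      rw [lookup_map_pyRange _ m i hi] at h0
      have hl : (pvAt n o y x i).length = 0 := by exact_mod_cast h0
      exact List.length_eq_zero_iff.mp hl
    obtain ⟨hSnd, hSmem⟩ := bSet n o y x (PySem.List.pyRange 0 m 1) PySem.Set.empty (by simp [PySem.Set.empty])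
    have hSmem' : ∀ q, (q ∈ (PySem.List.pyRange 0 m 1).foldl (fun s i =>
        pvOffs.foldl (fun s ab =>
          if pvGet2 o (pvWrap n (PySem.List.pyGetD y i 0 + ab.1)) (pvWrap n (PySem.List.pyGetD x i 0 + ab.2)) = "@"
          then PySem.Set.add s (pvWrap n (PySem.List.pyGetD y i 0 + ab.1), pvWrap n (PySem.List.pyGetD x i 0 + ab.2))
          else s) s) PySem.Set.empty
        ↔ ∃ i ∈ PySem.List.pyRange 0 m 1, q ∈ pvAt n o y x i) := by
      intro q
      rw [hSmem q]
      simp [PySem.Set.empty]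
    have hSpos : ∀ p ∈ (PySem.List.pyRange 0 m 1).foldl (fun s i =>
        pvOffs.foldl (fun s ab =>
          if pvGet2 o (pvWrap n (PySem.List.pyGetD y i 0 + ab.1)) (pvWrap n (PySem.List.pyGetD x i 0 + ab.2)) = "@"
          then PySem.Set.add s (pvWrap n (PySem.List.pyGetD y i 0 + ab.1), pvWrap n (PySem.List.pyGetD x i 0 + ab.2))
          else s) s) PySem.Set.empty, pvPosOk n p := by
      intro p hp
      obtain ⟨i, -, hpi⟩ := (hSmem' p).mp hp
      exact pvAt_posOk n o y x i hn p hpi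
    have hSat : ∀ p ∈ (PySem.List.pyRange 0 m 1).foldl (fun s i =>
        pvOffs.foldl (fun s ab =>
          if pvGet2 o (pvWrap n (PySem.List.pyGetD y i 0 + ab.1)) (pvWrap n (PySem.List.pyGetD x i 0 + ab.2)) = "@"
          then PySem.Set.add s (pvWrap n (PySem.List.pyGetD y i 0 + ab.1), pvWrap n (PySem.List.pyGetD x i 0 + ab.2))
          else s) s) PySem.Set.empty, pvGet2 o p.1 p.2 = "@" := by
      intro p hp
      obtain ⟨i, -, hpi⟩ := (hSmem' p).mp hp
      exact pvAt_at n o y x i p hpi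
    have hFLpos : ∀ p ∈ (PySem.List.pyRange 0 m 1).flatMap (pvAt n o y x), pvPosOk n p := by
      intro p hp
      rw [List.mem_flatMap] at hp
      obtain ⟨i, -, hpi⟩ := hp
      exact pvAt_posOk n o y x i hn p hpi
    have hA := outerA n o y x ((PySem.List.pyRange 0 m 1).map (fun i => ((pvAt n o y x i).length : Int)))
      hn hg (PySem.List.pyRange 0 m 1) hNum [] (by simp)
    rw [show pvMark o ([] : List (Int × Int)) = o from rfl, List.nil_append] at hA
    rw [hA]
    have hgrid : pvMark o ((PySem.List.pyRange 0 m 1).flatMap (pvAt n o y x))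
        = pvMark o ((PySem.List.pyRange 0 m 1).foldl (fun s i =>
            pvOffs.foldl (fun s ab =>
              if pvGet2 o (pvWrap n (PySem.List.pyGetD y i 0 + ab.1)) (pvWrap n (PySem.List.pyGetD x i 0 + ab.2)) = "@"
              then PySem.Set.add s (pvWrap n (PySem.List.pyGetD y i 0 + ab.1), pvWrap n (PySem.List.pyGetD x i 0 + ab.2))
              else s) s) PySem.Set.empty) := by
      apply mark_ext_mem _ _ n o hFLpos hSpos hg
      intro q
      rw [List.mem_flatMap, hSmem' q]
    rw [hgrid]
    rw [cnt_eq_sum n (pvMark o ((PySem.List.pyRange 0 m 1).foldl (fun s i =>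
            pvOffs.foldl (fun s ab =>
              if pvGet2 o (pvWrap n (PySem.List.pyGetD y i 0 + ab.1)) (pvWrap n (PySem.List.pyGetD x i 0 + ab.2)) = "@"
              then PySem.Set.add s (pvWrap n (PySem.List.pyGetD y i 0 + ab.1), pvWrap n (PySem.List.pyGetD x i 0 + ab.2))
              else s) s) PySem.Set.empty)),
      cnt_mark n o hn hg _ hSnd hSpos hSat, cnt_eq_sum n o]
    simp only [pvMark]
  · have hrm : PySem.List.pyRange 0 m 1 = [] := by simp [PySem.List.pyRange, hm0]
    have hrn : PySem.List.pyRange 0 n 1 = [] := by simp [PySem.List.pyRange, hn0]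
    simp [findSol, findSol_alt, hrm, hrn]
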